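-- pv_equiv track=rewrite | github.com/lukafernandes/TestesPI | 3.9.TabuleiroXadrez.py | formarTabuleiro
-- ===== SOURCE A (Python) =====
-- def formarTabuleiro(dimensao: int):
--     tabuleiro = ""
--     casaBranca = "o"
--     casaPreta = "*"
--     for i in range(1, dimensao+1): #i = linha
--         linha = ""
--         casa = ""
--         if(i%2 != 0):
--             for j in range(1, dimensao+1): #j = coluna
--                 if(j == 1):
--                     casa = casaBranca
--                 else:
--                     if(casa == casaBranca):
--                         casa = casaPreta
--                     else:
--                         casa = casaBranca
--                 linha = f"{linha}{casa}"
--         else: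
--             for j in range(1, dimensao+1): #j = coluna
--                 if(j == 1):
--                     casa = casaPreta
--                 else:
--                     if(casa == casaBranca):
--                         casa = casaPreta
--                     else:
--                         casa = casaBranca
--                 linha = f"{linha}{casa}"
--
--         if(i == 1):
--             tabuleiro = f"{tabuleiro}{linha}"
--         else:
--             tabuleiro = f"{tabuleiro}\n{linha}"
--
--     return tabuleiro
-- ===== SOURCE B (Python) =====
-- def formarTabuleiro(dimensao: int):
--     return "\n".join(
--         "".join("o" if (i + j) % 2 == 0 else "*" for j in range(dimensao))
--         for i in range(dimensao)
--     )
-- ===== Notes on version B (the rewrite author's own statement) =====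
-- stated objective: simpler
-- what changed: Replaces the stateful colour-flipping variable with first-column special cases by a closed-form coordinate-parity formula ((i+j)%2) and builds the board with nested joins instead of threaded string accumulators.
import Mathlib
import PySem

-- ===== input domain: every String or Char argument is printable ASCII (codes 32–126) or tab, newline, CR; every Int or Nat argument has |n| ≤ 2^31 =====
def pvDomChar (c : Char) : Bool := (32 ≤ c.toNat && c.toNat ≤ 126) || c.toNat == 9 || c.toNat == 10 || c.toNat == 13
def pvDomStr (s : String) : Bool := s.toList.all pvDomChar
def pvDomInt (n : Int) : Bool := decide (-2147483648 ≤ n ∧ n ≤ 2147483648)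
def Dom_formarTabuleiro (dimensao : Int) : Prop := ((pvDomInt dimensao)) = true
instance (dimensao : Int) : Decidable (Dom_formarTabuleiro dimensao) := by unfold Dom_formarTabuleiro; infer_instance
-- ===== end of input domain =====

-- B replaces A's stateful colour-flipping accumulator by a closed-form coordinate-parity
-- formula and nested joins; objective: simpler.

-- ===== PORT A =====
def formarTabuleiro (dimensao : Int) : String :=
  let casaBranca := "o"
  let casaPreta := "*"
  (PySem.List.pyRange 1 (dimensao + 1) 1).foldl (fun tabuleiro i =>
    let inner :=
      if PySem.Int.mod i 2 ≠ 0 then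
        (PySem.List.pyRange 1 (dimensao + 1) 1).foldl (fun (st : String × String) j =>
          let casa := if j = 1 then casaBranca
            else if st.2 = casaBranca then casaPreta else casaBranca
          (st.1 ++ casa, casa)) ("", "")
      else
        (PySem.List.pyRange 1 (dimensao + 1) 1).foldl (fun (st : String × String) j =>
          let casa := if j = 1 then casaPreta
            else if st.2 = casaBranca then casaPreta else casaBranca
          (st.1 ++ casa, casa)) ("", "")
    let linha := inner.1
    if i = 1 then tabuleiro ++ linha else tabuleiro ++ "\n" ++ linha) ""

-- ===== PORT B =====
def formarTabuleiro_alt (dimensao : Int) : String :=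
  PySem.Str.join "\n" ((PySem.List.pyRange 0 dimensao 1).map (fun i =>
    PySem.Str.join "" ((PySem.List.pyRange 0 dimensao 1).map (fun j =>
      if PySem.Int.mod (i + j) 2 = 0 then "o" else "*"))))

-- ===== PRECONDITION & SPEC =====
def Spec_formarTabuleiro (dimensao : Int) (out : String) : Prop := out = formarTabuleiro_alt dimensao
instance (dimensao : Int) (out : String) : Decidable (Spec_formarTabuleiro dimensao out) := by unfold Spec_formarTabuleiro; infer_instance

-- ===== CLAIM (what is proved, stated in full; the proofs are below) =====
def Claim_equal_formarTabuleiro : Prop := ∀ (dimensao : Int), Dom_formarTabuleiro dimensao → Spec_formarTabuleiro dimensao (formarTabuleiro dimensao)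

-- ===== LEMMAS AND PROOFS =====

/-- A's cell colour: column j (0-based) of a row starting with colour `c`. -/
def pvCellS (c : String) (j : Nat) : String :=
  if j % 2 = 0 then c else if c = "o" then "*" else "o"

/-- The row string built left to right. -/
def pvRowStr (c : String) : Nat → String
  | 0 => ""
  | n + 1 => pvRowStr c n ++ pvCellS c n

/-- Row k (0-based) of a board of width w. -/
def pvRowFor (w k : Nat) : String := pvRowStr (if k % 2 = 0 then "o" else "*") w

/-- The board with M rows of width w. -/
def pvBoard (w : Nat) : Nat → String
  | 0 => ""
  | m + 1 => if m = 0 then pvRowFor w 0 else pvBoard w m ++ "\n" ++ pvRowFor w m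

/-- A's inner-loop step, starting colour `c`. -/
def pvStep (c : String) : String × String → Int → String × String :=
  fun st j =>
    let casa := if j = 1 then c else if st.2 = "o" then "*" else "o"
    (st.1 ++ casa, casa)

lemma pvRange1 (d : Int) :
    PySem.List.pyRange 1 (d + 1) 1 = (List.range d.toNat).map (fun k : Nat => (1 : Int) + k) := by
  rw [PySem.List.pyRange_one]
  have h : d + 1 - 1 = d := by ring
  rw [h]

lemma pvRange0 (d : Int) :
    PySem.List.pyRange 0 d 1 = (List.range d.toNat).map (fun k : Nat => (k : Int)) := by
  rw [PySem.List.pyRange_one]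
  simp only [zero_add, Int.sub_zero]

lemma pvInner (c : String) (hc : c = "o" ∨ c = "*") (n : Nat) :
    ((List.range n).map (fun k : Nat => (1 : Int) + k)).foldl (pvStep c) ("", "") =
      (pvRowStr c n, if n = 0 then "" else pvCellS c (n - 1)) := by
  induction n with
  | zero => simp [pvRowStr]
  | succ n ih =>
    rw [List.range_succ, List.map_append, List.foldl_append, ih]
    rcases Nat.eq_zero_or_pos n with hn | hn
    · subst hn
      rcases hc with h | h <;> subst h <;> simp [pvStep, pvRowStr, pvCellS]
    · have hne : (1 + (n : Int)) ≠ 1 := by omega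
      have hflip : (if pvCellS c (n - 1) = "o" then "*" else "o") = pvCellS c n := by
        rcases hc with h | h <;> subst h <;>
          rcases Nat.mod_two_eq_zero_or_one n with hp | hp <;>
            simp [pvCellS, hp, show (n - 1) % 2 = 1 - n % 2 by omega]
      simp only [List.map_cons, List.map_nil, List.foldl_cons, List.foldl_nil, pvStep,
        if_neg hne]
      simp [pvRowStr, Nat.pos_iff_ne_zero.mp hn, hflip]

lemma pvOuter (d : Int) (M : Nat) :
    ((List.range M).map (fun k : Nat => (1 : Int) + k)).foldl
      (fun tabuleiro i =>
        let inner :=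
          if PySem.Int.mod i 2 ≠ 0 then
            ((List.range d.toNat).map (fun k : Nat => (1 : Int) + k)).foldl (pvStep "o") ("", "")
          else
            ((List.range d.toNat).map (fun k : Nat => (1 : Int) + k)).foldl (pvStep "*") ("", "")
        let linha := inner.1
        if i = 1 then tabuleiro ++ linha else tabuleiro ++ "\n" ++ linha) ""
      = pvBoard d.toNat M := by
  induction M with
  | zero => simp [pvBoard]
  | succ m ih =>
    rw [List.range_succ, List.map_append, List.foldl_append, ih]
    simp only [List.map_cons, List.map_nil, List.foldl_cons, List.foldl_nil]
    have hmod : PySem.Int.mod (1 + (m : Int)) 2 = (1 + (m : Int)) % 2 :=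
      PySem.Int.mod_eq_emod_of_pos (by norm_num)
    rw [pvInner "o" (Or.inl rfl), pvInner "*" (Or.inr rfl)]
    simp only [hmod]
    rcases Nat.mod_two_eq_zero_or_one m with hp | hp
    · have he : (1 + (m : Int)) % 2 = 1 := by omega
      rcases Nat.eq_zero_or_pos m with hm | hm
      · subst hm
        simp [pvBoard, pvRowFor]
      · have h1 : (1 + (m : Int)) ≠ 1 := by omega
        simp [he, h1, pvBoard, pvRowFor, hp, Nat.pos_iff_ne_zero.mp hm]
    · have he : (1 + (m : Int)) % 2 = 0 := by omega
      have hm : m ≠ 0 := by omega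
      have h1 : (1 + (m : Int)) ≠ 1 := by omega
      simp [he, h1, pvBoard, pvRowFor, hp, hm]

lemma pvEqA (d : Int) : formarTabuleiro d = pvBoard d.toNat d.toNat := by
  unfold formarTabuleiro
  rw [pvRange1 d]
  exact pvOuter d d.toNat

lemma pvJoinSnoc (sep : List Char) (ps : List (List Char)) (x : List Char) (h : ps ≠ []) :
    PySem.Chars.join sep (ps ++ [x]) = PySem.Chars.join sep ps ++ sep ++ x := by
  induction ps with
  | nil => exact absurd rfl h
  | cons p rest ih =>
    cases rest with
    | nil => simp [PySem.Chars.join_cons_cons, PySem.Chars.join_singleton]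
    | cons q rs =>
      have ih' := ih (by simp)
      rw [List.cons_append] at ih'
      simp only [List.cons_append, PySem.Chars.join_cons_cons, ih', List.append_assoc]

lemma pvJoinCellsL (c : String) (n : Nat) :
    PySem.Chars.join [] ((List.range n).map (fun j => (pvCellS c j).toList)) =
      (pvRowStr c n).toList := by
  induction n with
  | zero => simp [PySem.Chars.join_nil, pvRowStr]
  | succ n ih =>
    rw [List.range_succ, List.map_append]
    rcases Nat.eq_zero_or_pos n with hn | hn
    · subst hn
      simp [PySem.Chars.join_singleton, pvRowStr]
    · rw [List.map_cons, List.map_nil,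
        pvJoinSnoc [] _ _ (by simp [Nat.pos_iff_ne_zero.mp hn]), ih]
      simp [pvRowStr, String.toList_append]

lemma pvJoinRowsL (w M : Nat) :
    PySem.Chars.join ['\n'] ((List.range M).map (fun k => (pvRowFor w k).toList)) =
      (pvBoard w M).toList := by
  induction M with
  | zero => simp [PySem.Chars.join_nil, pvBoard]
  | succ m ih =>
    rw [List.range_succ, List.map_append]
    rcases Nat.eq_zero_or_pos m with hm | hm
    · subst hm
      simp [PySem.Chars.join_singleton, pvBoard]
    · rw [List.map_cons, List.map_nil,
        pvJoinSnoc ['\n'] _ _ (by simp [Nat.pos_iff_ne_zero.mp hm]), ih]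
      have hm' : m ≠ 0 := Nat.pos_iff_ne_zero.mp hm
      simp [pvBoard, hm', String.toList_append]

lemma pvCellB (k j : Nat) :
    (if PySem.Int.mod ((k : Int) + (j : Int)) 2 = 0 then "o" else "*") =
      pvCellS (if k % 2 = 0 then "o" else "*") j := by
  have hm : PySem.Int.mod ((k : Int) + (j : Int)) 2 = ((k : Int) + (j : Int)) % 2 :=
    PySem.Int.mod_eq_emod_of_pos (by norm_num)
  have hv : ((k : Int) + (j : Int)) % 2 = ((k % 2 + j % 2) % 2 : Nat) := by
    push_cast; omega
  rcases Nat.mod_two_eq_zero_or_one k with hk | hk <;>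
    rcases Nat.mod_two_eq_zero_or_one j with hj | hj <;>
      simp [pvCellS, hv, hk, hj]

lemma pvRowB (d : Int) (k : Nat) :
    PySem.Str.join "" (((List.range d.toNat).map (fun j : Nat => (j : Int))).map (fun j =>
        if PySem.Int.mod ((k : Int) + j) 2 = 0 then "o" else "*")) =
      pvRowFor d.toNat k := by
  rw [List.map_map]
  apply String.toList_inj.mp
  rw [PySem.Str.toList_join, List.map_map]
  have h0 : ("" : String).toList = [] := rfl
  rw [h0]
  simp only [Function.comp_def]
  simp only [pvCellB]
  rw [pvJoinCellsL]
  rfl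

lemma pvEqB (d : Int) : formarTabuleiro_alt d = pvBoard d.toNat d.toNat := by
  unfold formarTabuleiro_alt
  rw [pvRange0 d, List.map_map]
  apply String.toList_inj.mp
  rw [PySem.Str.toList_join, List.map_map]
  have h1 : ("\n" : String).toList = ['\n'] := rfl
  rw [h1]
  simp only [Function.comp_def]
  simp only [pvRowB]
  exact pvJoinRowsL d.toNat d.toNat

-- ===== VERDICT (by name: the statement is the Claim_ definition above) =====
theorem formarTabuleiro_spec : Claim_equal_formarTabuleiro := by
  intro d _
  unfold Spec_formarTabuleiro
  rw [pvEqA d, pvEqB d]
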